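-- pv_equiv track=rewrite | github.com/halitekmekcioglu/Algo | oddeven.py | sol
-- ===== SOURCE A (Python) =====
-- def sol(b, A):
--
--     b = sorted(A, reverse=True)
--
--     if b[0] % 2 == 1:
--         for i in b:
--             if i % 2 == 0:
--                 return i+b[0]
--         return b[0]
--
--     elif b[0] % 2 == 0:
--         for i in b:
--             if i % 2 == 1:
--                 return i+b[0]
--         return b[0]
-- ===== SOURCE B (Python) =====
-- def sol(b, A):
--     m = A[0]
--     me = None
--     mo = None
--     for x in A:
--         if x > m:
--             m = x
--         if x % 2 == 0:
--             if me is None or x > me: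
--                 me = x
--         else:
--             if mo is None or x > mo:
--                 mo = x
--     opp = mo if m % 2 == 0 else me
--     return m if opp is None else m + opp
-- ===== Notes on version B (the rewrite author's own statement) =====
-- stated objective: faster
-- what changed: Replaces sort-then-scan (sorted(A, reverse=True) and a linear search for the first opposite-parity element) with a single linear pass tracking the overall max and the max even / max odd elements.
import Mathlib
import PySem

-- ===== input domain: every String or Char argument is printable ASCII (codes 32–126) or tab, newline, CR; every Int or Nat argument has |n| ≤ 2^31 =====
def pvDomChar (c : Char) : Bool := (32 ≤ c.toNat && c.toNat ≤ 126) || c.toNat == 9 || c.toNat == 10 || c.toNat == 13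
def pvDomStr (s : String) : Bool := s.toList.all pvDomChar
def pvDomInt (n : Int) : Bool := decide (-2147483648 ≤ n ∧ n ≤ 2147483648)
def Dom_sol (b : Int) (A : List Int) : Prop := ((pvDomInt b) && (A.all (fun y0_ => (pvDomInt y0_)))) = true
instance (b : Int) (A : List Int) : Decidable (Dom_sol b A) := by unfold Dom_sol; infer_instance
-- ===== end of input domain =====

-- B replaces A's sort-then-scan with a single linear pass tracking the overall max and
-- the max even / max odd elements (objective: faster, O(n) instead of O(n log n)).

-- ===== PORT A =====
-- for i in b: if i % 2 == want: return i + h ;  return h  (h = b[0])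
def solLoop (want : Int) (h : Int) : List Int → Int
  | [] => h
  | i :: t => if PySem.Int.mod i 2 = want then i + h else solLoop want h t

def sol (b : Int) (A : List Int) : Int :=
  let s := PySem.List.sorted A (fun x => x) true
  match s with
  | [] => 0  -- b[0] raises IndexError in Python; excluded by Pre_sol
  | h :: _ =>
    if PySem.Int.mod h 2 = 1 then solLoop 0 h s
    else if PySem.Int.mod h 2 = 0 then solLoop 1 h s
    else 0  -- unreachable: mod _ 2 ∈ {0,1}; Python would fall off and return None

-- ===== PORT B =====
-- 'if o is None or x > o: o = x'
def updMax (o : Option Int) (x : Int) : Option Int :=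
  match o with
  | none => some x
  | some v => if x > v then some x else some v

-- one iteration of B's loop body over the state (m, me, mo)
def solStep (st : Int × Option Int × Option Int) (x : Int) : Int × Option Int × Option Int :=
  ((if x > st.1 then x else st.1),
   (if PySem.Int.mod x 2 = 0 then updMax st.2.1 x else st.2.1),
   (if PySem.Int.mod x 2 = 0 then st.2.2 else updMax st.2.2 x))

def sol_alt (b : Int) (A : List Int) : Int :=
  match A with
  | [] => 0  -- A[0] raises IndexError in Python; excluded by Pre_sol
  | a0 :: _ =>
    let st := A.foldl solStep (a0, none, none)
    let opp := if PySem.Int.mod st.1 2 = 0 then st.2.2 else st.2.1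
    match opp with
    | none => st.1
    | some o => st.1 + o

-- ===== PRECONDITION & SPEC =====
-- Python A evaluates b[0] on the sorted list, which raises IndexError for an empty A.
def Pre_sol (b : Int) (A : List Int) : Prop := A ≠ []
instance (b : Int) (A : List Int) : Decidable (Pre_sol b A) := by unfold Pre_sol; infer_instance
def pvWitness_sol : Int × List Int := (0, [3, 4])

def Spec_sol (b : Int) (A : List Int) (out : Int) : Prop := out = sol_alt b A
instance (b : Int) (A : List Int) (out : Int) : Decidable (Spec_sol b A out) := by unfold Spec_sol; infer_instance

-- ===== CLAIM (what is proved, stated in full; the proofs are below) =====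
def Claim_equal_sol : Prop := ∀ (b : Int) (A : List Int), Dom_sol b A → Pre_sol b A → Spec_sol b A (sol b A)

-- ===== LEMMAS AND PROOFS =====

-- the triple fold splits into three independent scalar folds
theorem foldl_solStep_decomp (A : List Int) (m : Int) (e o : Option Int) :
    A.foldl solStep (m, e, o) =
      (A.foldl (fun a x => if x > a then x else a) m,
       A.foldl (fun a x => if PySem.Int.mod x 2 = 0 then updMax a x else a) e,
       A.foldl (fun a x => if PySem.Int.mod x 2 = 0 then a else updMax a x) o) := by
  induction A generalizing m e o with
  | nil => rfl
  | cons y t ih => simp [List.foldl, solStep, ih]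

theorem max_fold_eq (A : List Int) (m : Int) :
    A.foldl (fun a x => if x > a then x else a) m = A.foldl max m := by
  have : (fun (a x : Int) => if x > a then x else a) = fun a x => max a x := by
    funext a x; simp [max_def]; split_ifs <;> omega
  rw [this]

-- characterisation of the optional running max over elements satisfying p
theorem optfold_char (p : Int → Prop) [DecidablePred p] (A : List Int) (acc : Option Int) :
    ((A.foldl (fun a x => if p x then updMax a x else a) acc) = none ↔
      (acc = none ∧ ∀ x ∈ A, ¬ p x)) ∧
    (∀ v, (A.foldl (fun a x => if p x then updMax a x else a) acc) = some v →
      ((p v ∧ v ∈ A) ∨ acc = some v) ∧ (∀ y ∈ A, p y → y ≤ v) ∧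
      (∀ w, acc = some w → w ≤ v)) := by
  induction A generalizing acc with
  | nil =>
    refine ⟨by simp, fun v hv => ?_⟩
    simp only [List.foldl] at hv
    exact ⟨Or.inr hv, by simp, fun w hw => by rw [hv] at hw; exact le_of_eq (Option.some.inj hw).symm⟩
  | cons y t ih =>
    by_cases hy : p y
    · have h := ih (updMax acc y)
      constructor
      · simp only [List.foldl, if_pos hy]
        rw [h.1]
        constructor
        · rintro ⟨h1, _⟩; cases acc <;> simp [updMax] at h1 <;> try (revert h1; split_ifs <;> simp)
        · rintro ⟨h1, h2⟩; exact absurd hy (h2 y (by simp))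
      · intro v hv
        simp only [List.foldl, if_pos hy] at hv
        obtain ⟨c1, c2, c3⟩ := h.2 v hv
        have hyv : y ≤ v := by
          rcases acc with _ | w
          · exact c3 y rfl
          · simp only [updMax] at c3
            by_cases hw : y > w
            · exact c3 y (by simp [hw])
            · have := c3 w (by simp [hw]); omega
        refine ⟨?_, ?_, ?_⟩
        · rcases c1 with ⟨hpv, hvm⟩ | hacc
          · exact Or.inl ⟨hpv, by simp [hvm]⟩
          · rcases acc with _ | w
            · simp [updMax] at hacc; exact Or.inl ⟨hacc ▸ hy, by simp [hacc]⟩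
            · simp only [updMax] at hacc
              by_cases hw : y > w
              · rw [if_pos hw] at hacc
                exact Or.inl ⟨(Option.some.inj hacc) ▸ hy, by simp [Option.some.inj hacc]⟩
              · rw [if_neg hw] at hacc; exact Or.inr hacc
        · intro z hz hpz
          rcases List.mem_cons.mp hz with rfl | hzt
          · exact hyv
          · exact c2 z hzt hpz
        · intro w hw
          subst hw
          simp only [updMax] at c3
          by_cases hc : y > w
          · have := c3 y (by simp [hc]); omega
          · exact c3 w (by simp [hc])
    · have h := ih acc
      constructor
      · simp only [List.foldl, if_neg hy]
        rw [h.1]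
        constructor
        · rintro ⟨h1, h2⟩
          refine ⟨h1, fun x hx => ?_⟩
          rcases List.mem_cons.mp hx with rfl | hxt
          · exact hy
          · exact h2 x hxt
        · rintro ⟨h1, h2⟩; exact ⟨h1, fun x hx => h2 x (by simp [hx])⟩
      · intro v hv
        simp only [List.foldl, if_neg hy] at hv
        obtain ⟨c1, c2, c3⟩ := h.2 v hv
        refine ⟨?_, ?_, c3⟩
        · rcases c1 with ⟨hpv, hvm⟩ | hacc
          · exact Or.inl ⟨hpv, by simp [hvm]⟩
          · exact Or.inr hacc
        · intro z hz hpz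
          rcases List.mem_cons.mp hz with rfl | hzt
          · exact absurd hpz hy
          · exact c2 z hzt hpz

-- A's for-loop returns h when no element has the wanted parity
theorem solLoop_none (want h : Int) (s : List Int)
    (hn : ∀ i ∈ s, ¬ PySem.Int.mod i 2 = want) : solLoop want h s = h := by
  induction s with
  | nil => rfl
  | cons i t ih =>
    simp only [solLoop, if_neg (hn i (by simp))]
    exact ih fun j hj => hn j (by simp [hj])

-- on a descending list, A's for-loop finds the maximum wanted-parity element
theorem solLoop_max (want h : Int) (s : List Int)
    (hpw : s.Pairwise (fun a b => b ≤ a)) (v : Int) (hv : v ∈ s)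
    (hpv : PySem.Int.mod v 2 = want)
    (hmax : ∀ y ∈ s, PySem.Int.mod y 2 = want → y ≤ v) :
    solLoop want h s = v + h := by
  induction s with
  | nil => simp at hv
  | cons i t ih =>
    by_cases hi : PySem.Int.mod i 2 = want
    · simp only [solLoop, if_pos hi]
      have hiv : i ≤ v := hmax i (by simp) hi
      have hvi : v ≤ i := by
        rcases List.mem_cons.mp hv with rfl | hvt
        · omega
        · exact (List.pairwise_cons.mp hpw).1 v hvt
      omega
    · simp only [solLoop, if_neg hi]
      have hvt : v ∈ t := by
        rcases List.mem_cons.mp hv with rfl | hvt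
        · exact absurd hpv hi
        · exact hvt
      exact ih (List.pairwise_cons.mp hpw).2 hvt
        fun y hy hpy => hmax y (by simp [hy]) hpy

-- mod 2 takes only the values 0 and 1
theorem mod_two_cases (x : Int) : PySem.Int.mod x 2 = 0 ∨ PySem.Int.mod x 2 = 1 := by
  have h0 := PySem.Int.mod_nonneg x (b := 2) (by norm_num)
  have h1 := PySem.Int.mod_lt x (b := 2) (by norm_num)
  omega

-- ===== VERDICT (by name: the statement is the Claim_ definition above) =====
theorem sol_spec : Claim_equal_sol := by
  intro b A _ hpre
  cases A with
  | nil => exact absurd rfl hpre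
  | cons a0 rest => ?_
  unfold Spec_sol sol sol_alt
  obtain ⟨h, t, hs⟩ : ∃ h t, PySem.List.sorted (a0 :: rest) (fun x => x) true = h :: t := by
    cases hsrt : PySem.List.sorted (a0 :: rest) (fun x => x) true with
    | nil => exact absurd ((PySem.List.sorted_eq_nil_iff (a0 :: rest) (fun x => x) true).mp hsrt) (by simp)
    | cons h t => exact ⟨h, t, rfl⟩
  simp only [hs]
  rw [foldl_solStep_decomp, max_fold_eq]
  dsimp only
  -- the running max equals the sorted head h
  have hhead : ∀ y ∈ (a0 :: rest), y ≤ h := by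
    intro y hy
    have := PySem.List.key_head_sorted_rev_ge (xs := a0 :: rest) (key := fun x => x) hs
    exact this y hy
  have hhmem : h ∈ (a0 :: rest) := by
    have : h ∈ PySem.List.sorted (a0 :: rest) (fun x => x) true := by simp [hs]
    exact (PySem.List.mem_sorted _ _ _ _).mp this
  have hm : (a0 :: rest).foldl max a0 = h := by
    have hfold : (a0 :: rest).foldl max a0 = rest.foldl max a0 := by
      simp [List.foldl]
    have hub := PySem.List.le_foldl_max rest a0
    have hmem := PySem.List.foldl_max_mem rest a0
    have hmA : rest.foldl max a0 ∈ (a0 :: rest) := by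
      rcases hmem with he | ht
      · simp [he]
      · simp [ht]
    have h1 : rest.foldl max a0 ≤ h := hhead _ hmA
    have h2 : h ≤ rest.foldl max a0 := by
      rcases List.mem_cons.mp (hhmem) with rfl | hht
      · exact hub.1
      · exact hub.2 h hht
    rw [hfold]; omega
  rw [hm]
  have hpw : (h :: t).Pairwise (fun a b => b ≤ a) := by
    have := PySem.List.sorted_pairwise_rev (xs := a0 :: rest) (key := fun x => x)
    rw [hs] at this; exact this
  have hmems : ∀ y, y ∈ (h :: t) ↔ y ∈ (a0 :: rest) := by
    intro y
    rw [← hs]; exact PySem.List.mem_sorted _ _ _ _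
  rcases mod_two_cases h with hpar | hpar
  · -- h even: A searches for an odd element; B uses mo
    rw [if_neg (by omega), if_pos hpar, if_pos hpar]
    have hodd : ∀ x : Int, (¬ PySem.Int.mod x 2 = 0) ↔ PySem.Int.mod x 2 = 1 := by
      intro x; rcases mod_two_cases x with h' | h' <;> constructor <;> intro <;> omega
    have hc := optfold_char (fun x => ¬ PySem.Int.mod x 2 = 0) (a0 :: rest) none
    have hfe : (a0 :: rest).foldl (fun a x => if PySem.Int.mod x 2 = 0 then a else updMax a x) none
        = (a0 :: rest).foldl (fun a x => if ¬ PySem.Int.mod x 2 = 0 then updMax a x else a) none := by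
      congr 1; funext a x
      by_cases hx : PySem.Int.mod x 2 = 0
      · rw [if_pos hx, if_neg (not_not_intro hx)]
      · rw [if_neg hx, if_pos hx]
    rw [hfe]
    cases hres : (a0 :: rest).foldl (fun a x => if ¬ PySem.Int.mod x 2 = 0 then updMax a x else a) none with
    | none =>
      have hn := (hc.1).mp hres
      exact solLoop_none 1 h (h :: t)
        fun i hi => by
          have := hn.2 i ((hmems i).mp hi)
          simp only [not_not] at this
          omega
    | some v =>
      obtain ⟨c1, c2, _⟩ := hc.2 v hres
      rcases c1 with ⟨hpv, hvm⟩ | habs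
      · rw [solLoop_max 1 h (h :: t) hpw v ((hmems v).mpr hvm) ((hodd v).mp hpv)
          (fun y hy hpy => c2 y ((hmems y).mp hy) ((hodd y).mpr hpy))]
        show v + h = h + v
        omega
      · exact absurd habs (by simp)
  · -- h odd: A searches for an even element; B uses me
    rw [if_pos hpar, if_neg (by omega)]
    have hc := optfold_char (fun x => PySem.Int.mod x 2 = 0) (a0 :: rest) none
    cases hres : (a0 :: rest).foldl (fun a x => if PySem.Int.mod x 2 = 0 then updMax a x else a) none with
    | none =>
      have hn := (hc.1).mp hres
      exact solLoop_none 0 h (h :: t)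
        fun i hi => hn.2 i ((hmems i).mp hi)
    | some v =>
      obtain ⟨c1, c2, _⟩ := hc.2 v hres
      rcases c1 with ⟨hpv, hvm⟩ | habs
      · rw [solLoop_max 0 h (h :: t) hpw v ((hmems v).mpr hvm) hpv
          (fun y hy hpy => c2 y ((hmems y).mp hy) hpy)]
        show v + h = h + v
        omega
      · exact absurd habs (by simp)
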